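-- pv_equiv track=rewrite | github.com/MalliKarjun008/python-coding-challenges | challenge_23_custom_series.py | generate_series
-- ===== SOURCE A (Python) =====
-- def generate_series(n):
--     if not isinstance(n, int) or n <= 0:
--         raise ValueError("N must be a positive integer")
--
--     result = []
--     diffs = [4, 4, 4, 8]
--     num = 1
--     i = 0
--
--     while num <= n:
--         result.append(num)
--         num += diffs[i]
--         i = (i + 1) % len(diffs)
--
--     return result
-- ===== SOURCE B (Python) =====
-- def generate_series(n):
--     if not isinstance(n, int) or n <= 0:
--         raise ValueError("N must be a positive integer")
--
--     result = []
--     base = 1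
--     while True:
--         for off in (0, 4, 8, 12):
--             val = base + off
--             if val > n:
--                 return result
--             result.append(val)
--         base += 20
-- ===== Notes on version B (the rewrite author's own statement) =====
-- stated objective: alternative
-- what changed: Replaces the flat while loop with a cyclic diffs list and modular index by a two-level block traversal: an outer loop over bases 1,21,41,... and an inner loop over the fixed offsets (0,4,8,12), returning as soon as a value exceeds n.
import Mathlib
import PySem

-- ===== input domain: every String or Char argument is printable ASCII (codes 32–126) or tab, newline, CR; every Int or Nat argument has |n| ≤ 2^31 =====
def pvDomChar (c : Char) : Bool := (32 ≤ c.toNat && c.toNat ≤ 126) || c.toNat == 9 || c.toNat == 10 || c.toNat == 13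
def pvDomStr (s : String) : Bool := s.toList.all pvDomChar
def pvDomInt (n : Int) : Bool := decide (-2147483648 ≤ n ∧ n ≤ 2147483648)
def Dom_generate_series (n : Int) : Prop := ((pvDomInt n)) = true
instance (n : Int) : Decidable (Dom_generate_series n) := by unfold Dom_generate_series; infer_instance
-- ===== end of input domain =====

-- B replaces A's flat modular-index while loop by an outer loop over bases 1,21,41,…
-- with an inner loop over the fixed offsets (0,4,8,12); same values, same cost (alternative decomposition).

-- ===== PORT A =====
-- termination helpers for the ports (cited by name in decreasing_by)
theorem gsStep_le (i : Fin 4) : 4 ≤ ([4, 4, 4, 8] : List Int).get i := by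
  fin_cases i <;> decide

theorem gsLoopA_dec (n num : Int) (i : Fin 4) (h : num ≤ n) :
    (n + 1 - (num + ([4, 4, 4, 8] : List Int).get i)).toNat < (n + 1 - num).toNat := by
  have := gsStep_le i
  omega

-- A's while loop: result grows while num ≤ n; num advances by diffs[i], i cycles mod 4.
-- i is kept as Fin 4 (A's `i = (i + 1) % len(diffs)` keeps it in 0..3 always); `i + 1` on Fin 4 is that mod.
def gsLoopA (n num : Int) (i : Fin 4) : List Int :=
  if _h : num ≤ n then
    num :: gsLoopA n (num + ([4, 4, 4, 8] : List Int).get i) (i + 1)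
  else []
termination_by (n + 1 - num).toNat
decreasing_by exact gsLoopA_dec n num i _h

-- A raises ValueError for n ≤ 0; those inputs are outside Pre_generate_series.
def generate_series (n : Int) : List Int := gsLoopA n 1 0

-- ===== PORT B =====
-- Inner loop over the offsets: returns the appended values and whether it returned early (val > n).
def gsInnerGo (n base : Int) : List Int → List Int × Bool
  | [] => ([], false)
  | off :: rest =>
    if base + off > n then ([], true)
    else
      let p := gsInnerGo n base rest
      ((base + off) :: p.1, p.2)

theorem gsInnerGo_not_stop {n base : Int}
    (h : ¬ (gsInnerGo n base [0, 4, 8, 12]).2 = true) : base ≤ n := by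
  by_contra hc
  apply h
  simp only [gsInnerGo]
  rw [if_pos (show base + 0 > n by omega)]

theorem gsOuterB_dec (n base : Int) (h : ¬ (gsInnerGo n base [0, 4, 8, 12]).2 = true) :
    (n + 1 - (base + 20)).toNat < (n + 1 - base).toNat := by
  have := gsInnerGo_not_stop h
  omega

-- Outer loop: one block per base; stop as soon as the inner loop returned early (`return result`).
def gsOuterB (n base : Int) : List Int :=
  if _h : (gsInnerGo n base [0, 4, 8, 12]).2 = true then (gsInnerGo n base [0, 4, 8, 12]).1
  else (gsInnerGo n base [0, 4, 8, 12]).1 ++ gsOuterB n (base + 20)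
termination_by (n + 1 - base).toNat
decreasing_by exact gsOuterB_dec n base _h

def generate_series_alt (n : Int) : List Int := gsOuterB n 1

-- ===== PRECONDITION & SPEC =====
-- A raises ValueError exactly when n ≤ 0 (non-int arguments are outside the type), so Pre_ is n ≥ 1.
def Pre_generate_series (n : Int) : Prop := 1 ≤ n
instance (n : Int) : Decidable (Pre_generate_series n) := by unfold Pre_generate_series; infer_instance
def pvWitness_generate_series : Int := (25)

def Spec_generate_series (n : Int) (out : List Int) : Prop := out = generate_series_alt n
instance (n : Int) (out : List Int) : Decidable (Spec_generate_series n out) := by unfold Spec_generate_series; infer_instance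

-- ===== CLAIM (what is proved, stated in full; the proofs are below) =====
def Claim_equal_generate_series : Prop := ∀ (n : Int), Dom_generate_series n → Pre_generate_series n → Spec_generate_series n (generate_series n)

-- ===== LEMMAS AND PROOFS =====

-- One block of A's loop (four steps, i = 0,1,2,3) equals one iteration of B's outer loop.
theorem gsLoopA_eq_gsOuterB (n : Int) : ∀ (k : Nat) (num : Int),
    (n + 1 - num).toNat ≤ k → gsLoopA n num 0 = gsOuterB n num := by
  intro k
  induction k with
  | zero =>
    intro num hk
    have h0 : ¬ num ≤ n := by omega
    have hin : gsInnerGo n num [0, 4, 8, 12] = ([], true) := by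
      simp only [gsInnerGo]
      split_ifs <;> first | (exfalso; omega) | norm_num
    rw [gsLoopA, gsOuterB, dif_neg h0]
    rw [hin]
    simp
  | succ k ih =>
    intro num hk
    rw [gsLoopA, gsOuterB]
    by_cases h0 : num ≤ n
    · rw [dif_pos h0]
      change num :: gsLoopA n (num + 4) 1 = _
      rw [gsLoopA]
      by_cases h1 : num + 4 ≤ n
      · rw [dif_pos h1]
        change num :: (num + 4) :: gsLoopA n (num + 4 + 4) 2 = _
        rw [gsLoopA]
        by_cases h2 : num + 4 + 4 ≤ n
        · rw [dif_pos h2]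
          change num :: (num + 4) :: (num + 4 + 4) :: gsLoopA n (num + 4 + 4 + 4) 3 = _
          rw [gsLoopA]
          by_cases h3 : num + 4 + 4 + 4 ≤ n
          · rw [dif_pos h3]
            change num :: (num + 4) :: (num + 4 + 4) :: (num + 4 + 4 + 4) ::
              gsLoopA n (num + 4 + 4 + 4 + 8) 0 = _
            rw [show num + 4 + 4 + 4 + 8 = num + 20 from by ring, ih (num + 20) (by omega)]
            have hin : gsInnerGo n num [0, 4, 8, 12]
                = ([num, num + 4, num + 8, num + 12], false) := by
              simp only [gsInnerGo]
              split_ifs <;> first | (exfalso; omega) | norm_num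
            rw [hin]
            norm_num
            omega
          · have hin : gsInnerGo n num [0, 4, 8, 12]
                = ([num, num + 4, num + 8], true) := by
              simp only [gsInnerGo]
              split_ifs <;> first | (exfalso; omega) | norm_num
            rw [dif_neg (by omega), hin]
            norm_num
            omega
        · have hin : gsInnerGo n num [0, 4, 8, 12] = ([num, num + 4], true) := by
            simp only [gsInnerGo]
            split_ifs <;> first | (exfalso; omega) | norm_num
          rw [dif_neg (by omega), hin]
          norm_num
      · have hin : gsInnerGo n num [0, 4, 8, 12] = ([num], true) := by
          simp only [gsInnerGo]
          split_ifs <;> first | (exfalso; omega) | norm_num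
        rw [dif_neg (by omega), hin]
        norm_num
    · have hin : gsInnerGo n num [0, 4, 8, 12] = ([], true) := by
        simp only [gsInnerGo]
        split_ifs <;> first | (exfalso; omega) | norm_num
      rw [dif_neg h0, hin]
      simp

-- ===== VERDICT (by name: the statement is the Claim_ definition above) =====
theorem generate_series_spec : Claim_equal_generate_series := by
  intro n _ _
  unfold Spec_generate_series generate_series generate_series_alt
  exact gsLoopA_eq_gsOuterB n (n + 1 - 1).toNat 1 le_rfl
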